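-- pv_equiv track=rewrite | github.com/981377660LMT/algorithm-study | 11_动态规划/子数组/最大子数组和/kadane.py | maxSubarraySumTwoSum
-- ===== SOURCE A (Python) =====
-- from typing import List, Tuple
--
-- def maxSubarraySumTwoSum(nums: List[int], gap: int) -> int:
--     """最大两段子段和（两段必须间隔至少 gap 个数）."""
--
--     def max(a: int, b: int) -> int:
--         return a if a > b else b
--
--     n = len(nums)
--     sufSumMax = [0] * n
--     sufSumMax[n - 1] = nums[n - 1]
--     curSumMax = nums[n - 1]
--     for i in range(n - 2, -1, -1):
--         v = nums[i]
--         curSumMax = max(curSumMax + v, v)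
--         sufSumMax[i] = max(sufSumMax[i + 1], curSumMax)
--     curSumMax = nums[0]
--     preSumMax = nums[0]
--     res = preSumMax + sufSumMax[1 + gap]
--     for i in range(1, n - 1 - gap):
--         v = nums[i]
--         curSumMax = max(curSumMax + v, v)
--         preSumMax = max(preSumMax, curSumMax)
--         res = max(res, preSumMax + sufSumMax[i + 1 + gap])
--     return res
-- ===== SOURCE B (Python) =====
-- from typing import List
--
--
-- def maxSubarraySumTwoSum(nums: List[int], gap: int) -> int:
--     """最大两段子段和（两段必须间隔至少 gap 个数）."""
--     n = len(nums)
--     pre = [0]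
--     for v in nums:
--         pre.append(pre[-1] + v)
--     # best subarray sum within nums[:i+1] = pre[j] - (min prefix sum so far):
--     # prefix-sum + running-minimum formulation (no Kadane reset recurrence).
--     preMax = []
--     mn = 0
--     for i in range(n):
--         cand = pre[i + 1] - mn
--         preMax.append(cand if not preMax or cand > preMax[-1] else preMax[-1])
--         if pre[i + 1] < mn:
--             mn = pre[i + 1]
--     # best subarray sum within nums[i:] = (max prefix sum to the right) - pre[i]
--     sufRev = []
--     mx = pre[n]
--     for i in range(n - 1, -1, -1):
--         cand = mx - pre[i]
--         sufRev.append(cand if not sufRev or cand > sufRev[-1] else sufRev[-1])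
--         if pre[i] > mx:
--             mx = pre[i]
--     sufMax = sufRev[::-1]
--     return max(preMax[i] + sufMax[i + 1 + gap] for i in range(n - 1 - gap))
-- ===== Notes on version B (the rewrite author's own statement) =====
-- stated objective: alternative
-- what changed: B drops A's Kadane recurrences entirely: it builds a prefix-sum array once and derives the best-ending and best-starting subarray tables as differences against a running minimum (resp. maximum) of prefix sums, then combines the two tables with one max() over pair sums.
import Mathlib
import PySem

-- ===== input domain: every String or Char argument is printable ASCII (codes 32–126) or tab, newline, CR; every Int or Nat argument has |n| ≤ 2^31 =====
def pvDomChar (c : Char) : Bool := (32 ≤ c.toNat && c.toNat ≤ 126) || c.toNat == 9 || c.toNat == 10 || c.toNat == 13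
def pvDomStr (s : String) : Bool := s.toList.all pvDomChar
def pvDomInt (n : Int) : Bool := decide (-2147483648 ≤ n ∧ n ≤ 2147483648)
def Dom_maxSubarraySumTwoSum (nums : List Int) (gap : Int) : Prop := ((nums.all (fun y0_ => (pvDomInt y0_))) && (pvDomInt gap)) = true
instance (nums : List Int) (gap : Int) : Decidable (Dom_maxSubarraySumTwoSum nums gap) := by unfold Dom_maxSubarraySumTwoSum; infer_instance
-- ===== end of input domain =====

-- B replaces A's Kadane recurrences entirely: it builds the prefix-sum array once and gets
-- each best-subarray table from a running MINIMUM (resp. MAXIMUM) of prefix sums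
-- (subarray sum = difference of two prefix sums).  Objective: alternative algorithm.

-- ===== PORT A =====
-- A's local helper 'max(a, b)'
def pvMaxA (a b : Int) : Int := if a > b then a else b

-- body of A's backward loop 'for i in range(n-2, -1, -1)' (state = (sufSumMax, curSumMax))
def pvA1 (nums : List Int) (st : List Int × Int) (i : Int) : List Int × Int :=
  let v := PySem.List.pyGetD nums i 0
  let cur := pvMaxA (st.2 + v) v
  (PySem.List.pySetD st.1 i (pvMaxA (PySem.List.pyGetD st.1 (i + 1) 0) cur), cur)

-- body of A's forward loop 'for i in range(1, n-1-gap)' (state = (curSumMax, preSumMax, res))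
def pvA2 (nums suf : List Int) (gap : Int) (st : Int × Int × Int) (i : Int) : Int × Int × Int :=
  let v := PySem.List.pyGetD nums i 0
  let cur := pvMaxA (st.1 + v) v
  let pre := pvMaxA st.2.1 cur
  (cur, pre, pvMaxA st.2.2 (pre + PySem.List.pyGetD suf (i + 1 + gap) 0))

def maxSubarraySumTwoSum (nums : List Int) (gap : Int) : Int :=
  let n : Int := nums.length
  let suf0 : List Int := List.replicate nums.length 0
  let suf1 := PySem.List.pySetD suf0 (n - 1) (PySem.List.pyGetD nums (n - 1) 0)
  let cur1 := PySem.List.pyGetD nums (n - 1) 0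
  let st := (PySem.List.pyRange (n - 2) (-1) (-1)).foldl (pvA1 nums) (suf1, cur1)
  let sufSumMax := st.1
  let cur0 := PySem.List.pyGetD nums 0 0
  let res0 := cur0 + PySem.List.pyGetD sufSumMax (1 + gap) 0
  ((PySem.List.pyRange 1 (n - 1 - gap) 1).foldl (pvA2 nums sufSumMax gap) (cur0, cur0, res0)).2.2

-- ===== PORT B =====
-- body of B's 'pre.append(pre[-1] + v)' loop building the prefix-sum array
def pvPreStep (acc : List Int) (v : Int) : List Int :=
  acc ++ [PySem.List.pyGetD acc (-1) 0 + v]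

def pvPre (nums : List Int) : List Int := nums.foldl pvPreStep [0]

-- body of B's forward loop (state = (preMax, mn)): cand = pre[i+1] - (running min of prefix sums)
def pvB1 (pre : List Int) (st : List Int × Int) (i : Int) : List Int × Int :=
  let cand := PySem.List.pyGetD pre (i + 1) 0 - st.2
  let b := match st.1.getLast? with
           | none => cand
           | some b => if cand > b then cand else b
  (st.1 ++ [b],
   if PySem.List.pyGetD pre (i + 1) 0 < st.2 then PySem.List.pyGetD pre (i + 1) 0 else st.2)

-- body of B's backward loop (state = (sufRev, mx)): cand = (running max of prefix sums) - pre[i]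
def pvB2 (pre : List Int) (st : List Int × Int) (i : Int) : List Int × Int :=
  let cand := st.2 - PySem.List.pyGetD pre i 0
  let b := match st.1.getLast? with
           | none => cand
           | some b => if cand > b then cand else b
  (st.1 ++ [b],
   if PySem.List.pyGetD pre i 0 > st.2 then PySem.List.pyGetD pre i 0 else st.2)

def maxSubarraySumTwoSum_alt (nums : List Int) (gap : Int) : Int :=
  let n : Int := nums.length
  let pre := pvPre nums
  let preMax := ((PySem.List.pyRange 0 n 1).foldl (pvB1 pre) ([], 0)).1
  let sufMax := (((PySem.List.pyRange (n - 1) (-1) (-1)).foldl (pvB2 pre)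
                  ([], PySem.List.pyGetD pre n 0)).1).reverse
  (PySem.List.max?
    ((PySem.List.pyRange 0 (n - 1 - gap) 1).map
      (fun i => PySem.List.pyGetD preMax i 0 + PySem.List.pyGetD sufMax (i + 1 + gap) 0))
    (fun y => y)).getD 0

-- ===== PRECONDITION & SPEC =====
-- Pre_ is exactly the set of inputs on which the Python A returns normally: A raises IndexError
-- for empty nums, for gap > n-2 (the unconditional sufSumMax[1+gap] read) and for gap < -1
-- (the forward loop then runs past the end of nums).
def Pre_maxSubarraySumTwoSum (nums : List Int) (gap : Int) : Prop :=
  nums ≠ [] ∧ -1 ≤ gap ∧ gap ≤ (nums.length : Int) - 2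
instance (nums : List Int) (gap : Int) : Decidable (Pre_maxSubarraySumTwoSum nums gap) := by unfold Pre_maxSubarraySumTwoSum; infer_instance

def pvWitness_maxSubarraySumTwoSum : List Int × Int := ([3, -1, 4, -2, 5], 1)

def Spec_maxSubarraySumTwoSum (nums : List Int) (gap : Int) (out : Int) : Prop := out = maxSubarraySumTwoSum_alt nums gap
instance (nums : List Int) (gap : Int) (out : Int) : Decidable (Spec_maxSubarraySumTwoSum nums gap out) := by unfold Spec_maxSubarraySumTwoSum; infer_instance

-- ===== CLAIM (what is proved, stated in full; the proofs are below) =====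
def Claim_equal_maxSubarraySumTwoSum : Prop := ∀ (nums : List Int) (gap : Int), Dom_maxSubarraySumTwoSum nums gap → Pre_maxSubarraySumTwoSum nums gap → Spec_maxSubarraySumTwoSum nums gap (maxSubarraySumTwoSum nums gap)

-- ===== LEMMAS AND PROOFS =====

-- reference Kadane specs: sCur l = best sum of a nonempty prefix of l;
-- sBest l = best subarray sum of l; sList l = the suffix-best table [sBest (l.drop i)].
def sCur : List Int → Int
  | [] => 0
  | v :: rest => max (sCur rest + v) v

def sBest : List Int → Int
  | [] => 0
  | [v] => v
  | v :: w :: rest => max (sBest (w :: rest)) (sCur (v :: w :: rest))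

def sList : List Int → List Int
  | [] => []
  | v :: rest => sBest (v :: rest) :: sList rest

-- mps l = best (possibly empty) prefix sum of l; pM nums k = B's preMax table after k steps
def mps : List Int → Int
  | [] => 0
  | v :: t => max 0 (v + mps t)

def pM (nums : List Int) (k : Nat) : List Int :=
  (List.range k).map (fun j => sBest ((nums.take (j + 1)).reverse))

lemma pvMaxA_eq (a b : Int) : pvMaxA a b = max a b := by
  unfold pvMaxA; rw [max_def]; split_ifs <;> omega

lemma sBest_cons (v : Int) (l : List Int) (h : l ≠ []) :
    sBest (v :: l) = max (sBest l) (sCur (v :: l)) := by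
  cases l with
  | nil => exact absurd rfl h
  | cons w t => rfl

lemma length_sList (l : List Int) : (sList l).length = l.length := by
  induction l with
  | nil => rfl
  | cons v rest ih => simp [sList, ih]

lemma sList_getElem (l : List Int) (i : Nat) (h : i < l.length)
    (h' : i < (sList l).length) : (sList l)[i] = sBest (l.drop i) := by
  induction l generalizing i with
  | nil => simp at h
  | cons v rest ih =>
    cases i with
    | zero => rfl
    | succ j =>
      simp only [sList, List.getElem_cons_succ, List.drop_succ_cons]
      exact ih j (by simpa using h) (by simpa [length_sList] using h)

lemma sCur_single (x : Int) : sCur [x] = x := by simp [sCur]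

lemma mps_eq (l : List Int) : mps l = max (sCur l) 0 := by
  induction l with
  | nil => simp [mps, sCur]
  | cons v t ih => rw [mps, sCur, ih]; omega

-- ---- B-side: prefix sums ----
lemma pvPre_eq (nums : List Int) :
    pvPre nums = (List.range (nums.length + 1)).map (fun k => (nums.take k).sum) := by
  unfold pvPre
  induction nums using List.reverseRecOn with
  | nil => simp
  | append_singleton xs v ih =>
    rw [List.foldl_append, ih, List.foldl_cons, List.foldl_nil]
    unfold pvPreStep
    have hlast : PySem.List.pyGetD
          ((List.range (xs.length + 1)).map (fun k => (xs.take k).sum)) (-1) 0 = xs.sum := by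
      rw [List.range_succ, List.map_append, List.map_singleton,
          PySem.List.pyGetD_neg_one_append_singleton, List.take_length]
    rw [hlast, show (xs ++ [v]).length + 1 = (xs.length + 1) + 1 by simp,
        List.range_succ (n := xs.length + 1), List.map_append, List.map_singleton]
    congr 1
    · exact List.map_congr_left (fun k hk => by
        rw [List.mem_range] at hk
        rw [List.take_append_of_le_length (by omega)])
    · rw [List.take_of_length_le (by simp)]
      simp

lemma pre_read (nums : List Int) (j : Nat) (h : j ≤ nums.length) :
    PySem.List.pyGetD (pvPre nums) (j : Int) 0 = (nums.take j).sum := by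
  rw [pvPre_eq, PySem.List.pyGetD_natCast,
      List.getD_eq_getElem _ _ (by simp; omega), List.getElem_map, List.getElem_range]

-- ---- A-side backward loop ----
lemma loop1 (nums : List Int) : ∀ (i : Nat), i + 1 ≤ nums.length →
    (PySem.List.pyRange ((i : Int) - 1) (-1) (-1)).foldl (pvA1 nums)
      (List.replicate i 0 ++ sList (nums.drop i), sCur (nums.drop i))
    = (sList nums, sCur nums) := by
  intro i
  induction i with
  | zero =>
    intro _
    rw [show ((0 : Nat) : Int) - 1 = -1 by norm_num, PySem.List.pyRange_neg_one_eq_nil (by norm_num)]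
    simp
  | succ j ih =>
    intro h
    have hj : j < nums.length := by omega
    have hj1 : j + 1 < nums.length := by omega
    have hdropj : nums.drop j = nums[j] :: nums.drop (j + 1) := List.drop_eq_getElem_cons hj
    have hdne : nums.drop (j + 1) ≠ [] := by
      intro hc
      have := congrArg List.length hc
      simp at this; omega
    have hstep : pvA1 nums (List.replicate (j + 1) 0 ++ sList (nums.drop (j + 1)), sCur (nums.drop (j + 1))) (j : Int)
        = (List.replicate j 0 ++ sList (nums.drop j), sCur (nums.drop j)) := by
      unfold pvA1
      have e1 : ((j : Int) + 1) = ((j + 1 : Nat) : Int) := by push_cast; ring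
      simp only [e1, PySem.List.pyGetD_natCast, PySem.List.pySetD_natCast, pvMaxA_eq]
      have hv : nums.getD j 0 = nums[j] := List.getD_eq_getElem nums 0 hj
      have hcur : max (sCur (nums.drop (j + 1)) + nums.getD j 0) (nums.getD j 0)
          = sCur (nums.drop j) := by rw [hv, hdropj]; rfl
      have hread : (List.replicate (j + 1) (0 : Int) ++ sList (nums.drop (j + 1))).getD (j + 1) 0
          = sBest (nums.drop (j + 1)) := by
        rw [List.getD_eq_getElem _ _ (by simp [length_sList]; omega),
            List.getElem_append_right (by simp)]
        simp only [List.length_replicate, Nat.sub_self]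
        simpa using sList_getElem (nums.drop (j + 1)) 0 (by simp; omega)
          (by simp [length_sList]; omega)
      have hx : max (sBest (nums.drop (j + 1))) (sCur (nums.drop j)) = sBest (nums.drop j) := by
        rw [hdropj, sBest_cons _ _ hdne, ← hdropj]
      have hset : (List.replicate (j + 1) (0 : Int) ++ sList (nums.drop (j + 1))).set j (sBest (nums.drop j))
          = List.replicate j 0 ++ sList (nums.drop j) := by
        rw [List.set_append]
        simp only [List.length_replicate, show j < j + 1 by omega, if_pos]
        have h1 : (List.replicate (j + 1) (0 : Int)).set j (sBest (nums.drop j))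
            = List.replicate j 0 ++ [sBest (nums.drop j)] := by
          rw [List.replicate_succ', List.set_append]; simp
        rw [h1, List.append_assoc, List.singleton_append]
        congr 1
        rw [hdropj]
        rfl
      simp only [hcur, hread, hx, hset]
    rw [show ((j + 1 : Nat) : Int) - 1 = (j : Int) by push_cast; ring,
        PySem.List.pyRange_neg_one_cons (by omega), List.foldl_cons, hstep]
    have := ih (by omega)
    rwa [show ((j : Nat) : Int) - 1 = (j : Int) - 1 by rfl] at this

-- ---- reading B's preMax table ----
lemma preVal (nums : List Int) (j : Nat) (h : j < nums.length) :
    PySem.List.pyGetD (pM nums nums.length) (j : Int) 0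
      = sBest ((nums.take (j + 1)).reverse) := by
  rw [pM, PySem.List.pyGetD_natCast,
      List.getD_eq_getElem _ _ (by simpa using h), List.getElem_map, List.getElem_range]

-- ---- A-side forward loop ----
lemma loop2 (nums : List Int) (gap : Int) (m : Int) (hm : m ≤ (nums.length : Int)) :
    ∀ (k a : Nat), (m - (a : Int)).toNat ≤ k → 1 ≤ a →
    ∀ (cur pre res : Int),
      cur = sCur ((nums.take a).reverse) → pre = sBest ((nums.take a).reverse) →
      ((PySem.List.pyRange (a : Int) m 1).foldl (pvA2 nums (sList nums) gap) (cur, pre, res)).2.2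
      = (PySem.List.pyRange (a : Int) m 1).foldl
          (fun r j => max r (PySem.List.pyGetD (pM nums nums.length) j 0
            + PySem.List.pyGetD (sList nums) (j + 1 + gap) 0)) res := by
  intro k
  induction k with
  | zero =>
    intro a hk _ cur pre res _ _
    rw [PySem.List.pyRange_one_eq_nil (by omega)]
    rfl
  | succ k ih =>
    intro a hk ha cur pre res hcur hpre
    by_cases hma : m ≤ (a : Int)
    · rw [PySem.List.pyRange_one_eq_nil hma]
      rfl
    · have han : a < nums.length := by omega
      have htake : nums.take (a + 1) = nums.take a ++ [nums[a]] := by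
        rw [List.take_add_one]; simp [List.getElem?_eq_getElem han]
      have htne : (nums.take a).reverse ≠ [] := by
        simp only [ne_eq, List.reverse_eq_nil_iff, List.take_eq_nil_iff, not_or]
        exact ⟨by omega, by intro h; rw [h] at han; simp at han⟩
      have hcur' : max (cur + nums.getD a 0) (nums.getD a 0)
          = sCur ((nums.take (a + 1)).reverse) := by
        rw [List.getD_eq_getElem nums 0 han, hcur, htake]
        simp only [List.reverse_append, List.reverse_cons, List.reverse_nil,
          List.nil_append, List.singleton_append]
        rfl
      have hpre' : max pre (sCur ((nums.take (a + 1)).reverse))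
          = sBest ((nums.take (a + 1)).reverse) := by
        rw [hpre, htake]
        simp only [List.reverse_append, List.reverse_cons, List.reverse_nil,
          List.nil_append, List.singleton_append]
        rw [sBest_cons _ _ htne]
      rw [PySem.List.pyRange_one_cons (by omega)]
      simp only [List.foldl_cons]
      have hstep2 : pvA2 nums (sList nums) gap (cur, pre, res) (a : Int)
          = (sCur ((nums.take (a + 1)).reverse), sBest ((nums.take (a + 1)).reverse),
             max res (sBest ((nums.take (a + 1)).reverse)
               + PySem.List.pyGetD (sList nums) ((a : Int) + 1 + gap) 0)) := by
        unfold pvA2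
        simp only [PySem.List.pyGetD_natCast, pvMaxA_eq, hcur', hpre']
      rw [hstep2, preVal nums a han]
      have e1 : ((a : Int) + 1) = ((a + 1 : Nat) : Int) := by push_cast; ring
      rw [e1]
      exact ih (a + 1) (by omega) (by omega) _ _ _ rfl rfl

-- ---- B-side backward loop: yields the reversed suffix-best table (sList nums).reverse ----
lemma loopB2 (nums : List Int) : ∀ (i : Nat), i ≤ nums.length →
    (PySem.List.pyRange ((i : Int) - 1) (-1) (-1)).foldl (pvB2 (pvPre nums))
      ((sList (nums.drop i)).reverse, (nums.take i).sum + mps (nums.drop i))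
    = ((sList nums).reverse, (nums.take 0).sum + mps nums) := by
  intro i
  induction i with
  | zero =>
    intro _
    rw [show ((0 : Nat) : Int) - 1 = -1 by norm_num, PySem.List.pyRange_neg_one_eq_nil (by norm_num)]
    simp
  | succ j ih =>
    intro h
    have hj : j < nums.length := by omega
    have hdropj : nums.drop j = nums[j] :: nums.drop (j + 1) := List.drop_eq_getElem_cons hj
    have hsum : (nums.take (j + 1)).sum = (nums.take j).sum + nums[j] :=
      List.sum_take_succ nums j hj
    have hstep : pvB2 (pvPre nums)
        ((sList (nums.drop (j + 1))).reverse, (nums.take (j + 1)).sum + mps (nums.drop (j + 1))) (j : Int)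
        = ((sList (nums.drop j)).reverse, (nums.take j).sum + mps (nums.drop j)) := by
      unfold pvB2
      rw [pre_read nums j (by omega)]
      have hcand : (nums.take (j + 1)).sum + mps (nums.drop (j + 1)) - (nums.take j).sum
          = sCur (nums.drop j) := by
        rw [hsum, mps_eq, hdropj]
        show _ = max (sCur (nums.drop (j + 1)) + nums[j]) nums[j]
        omega
      have hmx : (if (nums.take j).sum > (nums.take (j + 1)).sum + mps (nums.drop (j + 1))
            then (nums.take j).sum
            else (nums.take (j + 1)).sum + mps (nums.drop (j + 1)))
          = (nums.take j).sum + mps (nums.drop j) := by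
        rw [hsum, hdropj, mps]
        split_ifs <;> omega
      by_cases hdn : nums.drop (j + 1) = []
      · have hdj : nums.drop j = [nums[j]] := by rw [hdropj, hdn]
        have hsl : sList (nums.drop (j + 1)) = [] := by rw [hdn]; rfl
        rw [hsl]
        simp only [List.reverse_nil, List.getLast?_nil]
        rw [hcand, hmx, hdj]
        simp [sList, sBest, sCur]
      · have hlast : ((sList (nums.drop (j + 1))).reverse).getLast?
            = some (sBest (nums.drop (j + 1))) := by
          obtain ⟨w, t, hwt⟩ := List.exists_cons_of_ne_nil hdn
          rw [hwt, List.getLast?_reverse]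
          rfl
        simp only [hlast]
        have hb : (if sCur (nums.drop j) > sBest (nums.drop (j + 1))
              then sCur (nums.drop j) else sBest (nums.drop (j + 1)))
            = sBest (nums.drop j) := by
          rw [hdropj, sBest_cons _ _ hdn, ← hdropj, max_def]
          split_ifs <;> omega
        rw [hcand, hb, hmx, hdropj, sList, List.reverse_cons]
    rw [show ((j + 1 : Nat) : Int) - 1 = (j : Int) by push_cast; ring,
        PySem.List.pyRange_neg_one_cons (by omega), List.foldl_cons, hstep]
    have := ih (by omega)
    rwa [show ((j : Nat) : Int) - 1 = (j : Int) - 1 by rfl] at this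

-- ---- B-side forward loop: one step extends the prefix-best table pM ----
lemma pM_last (nums : List Int) (j : Nat) :
    (pM nums (j + 1)).getLast? = some (sBest ((nums.take (j + 1)).reverse)) := by
  rw [pM, List.range_succ, List.map_append]
  simp

lemma stepB1 (nums : List Int) (i : Nat) (hi : i < nums.length) :
    pvB1 (pvPre nums) (pM nums i, (nums.take i).sum - mps ((nums.take i).reverse)) (i : Int)
      = (pM nums (i + 1), (nums.take (i + 1)).sum - mps ((nums.take (i + 1)).reverse)) := by
  have htake : nums.take (i + 1) = nums.take i ++ [nums[i]] := by
    rw [List.take_add_one]; simp [List.getElem?_eq_getElem hi]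
  have hrev : (nums.take (i + 1)).reverse = nums[i] :: (nums.take i).reverse := by
    rw [htake]; simp
  have hsum : (nums.take (i + 1)).sum = (nums.take i).sum + nums[i] :=
    List.sum_take_succ nums i hi
  unfold pvB1
  have e1 : ((i : Int) + 1) = ((i + 1 : Nat) : Int) := by push_cast; ring
  rw [e1, pre_read nums (i + 1) (by omega)]
  have hcand : (nums.take (i + 1)).sum - ((nums.take i).sum - mps ((nums.take i).reverse))
      = sCur ((nums.take (i + 1)).reverse) := by
    rw [hsum, mps_eq, hrev]
    show _ = max (sCur ((nums.take i).reverse) + nums[i]) nums[i]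
    omega
  have hmn : (if (nums.take (i + 1)).sum < (nums.take i).sum - mps ((nums.take i).reverse)
        then (nums.take (i + 1)).sum else (nums.take i).sum - mps ((nums.take i).reverse))
      = (nums.take (i + 1)).sum - mps ((nums.take (i + 1)).reverse) := by
    rw [hrev, mps, hsum]
    split_ifs <;> omega
  cases i with
  | zero =>
    have hpm0 : pM nums 0 = [] := by simp [pM]
    have hpm1 : pM nums (0 + 1) = [sBest ((nums.take (0 + 1)).reverse)] := by simp [pM]
    have hone : (nums.take (0 + 1)).reverse = [nums[0]] := hrev.trans (by simp)
    rw [hpm0]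
    simp only [List.getLast?_nil]
    rw [hcand, hmn, hpm1, List.nil_append, hone, sCur_single]
    simp [sBest]
  | succ j =>
    simp only [pM_last nums j]
    have htne : (nums.take (j + 1)).reverse ≠ [] := by
      simp only [ne_eq, List.reverse_eq_nil_iff, List.take_eq_nil_iff, not_or]
      exact ⟨by omega, by intro h; rw [h] at hi; simp at hi⟩
    have hb : (if sCur ((nums.take (j + 1 + 1)).reverse) > sBest ((nums.take (j + 1)).reverse)
          then sCur ((nums.take (j + 1 + 1)).reverse) else sBest ((nums.take (j + 1)).reverse))
        = sBest ((nums.take (j + 1 + 1)).reverse) := by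
      rw [hrev, sBest_cons _ _ htne, max_def]
      split_ifs <;> omega
    rw [hcand, hb, hmn]
    have hpm : pM nums (j + 1 + 1) = pM nums (j + 1) ++ [sBest ((nums.take (j + 1 + 1)).reverse)] := by
      unfold pM
      rw [List.range_succ, List.map_append]
      rfl
    rw [hpm]

-- ---- B-side forward loop: yields the prefix-best table pM ----
lemma loopB1 (nums : List Int) : ∀ (k i : Nat), i + k = nums.length →
    (PySem.List.pyRange (i : Int) (nums.length : Int) 1).foldl (pvB1 (pvPre nums))
      (pM nums i, (nums.take i).sum - mps ((nums.take i).reverse))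
    = (pM nums nums.length,
       (nums.take nums.length).sum - mps ((nums.take nums.length).reverse)) := by
  intro k
  induction k with
  | zero =>
    intro i hik
    rw [PySem.List.pyRange_one_eq_nil (by omega)]
    simp only [List.foldl_nil]
    rw [show i = nums.length by omega]
  | succ k ih =>
    intro i hik
    have hi : i < nums.length := by omega
    rw [PySem.List.pyRange_one_cons (by omega), List.foldl_cons, stepB1 nums i hi]
    have e1 : ((i : Int) + 1) = ((i + 1 : Nat) : Int) := by push_cast; ring
    rw [e1]
    exact ih (i + 1) (by omega)

-- ===== VERDICT (by name: the statement is the Claim_ definition above) =====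
theorem maxSubarraySumTwoSum_spec : Claim_equal_maxSubarraySumTwoSum := by
  intro nums gap _ hpre
  obtain ⟨hne, hg1, hg2⟩ := hpre
  have hn : 1 ≤ nums.length := List.length_pos_iff.mpr hne
  unfold Spec_maxSubarraySumTwoSum maxSubarraySumTwoSum maxSubarraySumTwoSum_alt
  simp only []
  -- A's backward loop produces the suffix-best table sList nums
  have hn1 : nums.length - 1 < nums.length := by omega
  have e1 : ((nums.length : Int) - 1) = ((nums.length - 1 : Nat) : Int) := by push_cast [hn]; ring
  have hdropl : nums.drop (nums.length - 1) = [nums[nums.length - 1]] := by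
    rw [List.drop_eq_getElem_cons hn1, show nums.length - 1 + 1 = nums.length by omega,
        List.drop_length]
  have hinit : PySem.List.pySetD (List.replicate nums.length (0 : Int)) ((nums.length : Int) - 1)
        (PySem.List.pyGetD nums ((nums.length : Int) - 1) 0)
      = List.replicate (nums.length - 1) 0 ++ sList (nums.drop (nums.length - 1)) := by
    rw [e1, PySem.List.pySetD_natCast, PySem.List.pyGetD_natCast,
        List.getD_eq_getElem nums 0 hn1, hdropl]
    rw [show List.replicate nums.length (0 : Int) = List.replicate ((nums.length - 1) + 1) 0 by
          congr 1; omega,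
        List.replicate_succ', List.set_append]
    simp [sList, sBest]
  have hcur1 : PySem.List.pyGetD nums ((nums.length : Int) - 1) 0
      = sCur (nums.drop (nums.length - 1)) := by
    rw [e1, PySem.List.pyGetD_natCast, List.getD_eq_getElem nums 0 hn1, hdropl, sCur_single]
  have e2 : ((nums.length : Int) - 2) = ((nums.length - 1 : Nat) : Int) - 1 := by
    push_cast [hn]; ring
  have hsuf : (PySem.List.pyRange ((nums.length : Int) - 2) (-1) (-1)).foldl (pvA1 nums)
        (PySem.List.pySetD (List.replicate nums.length (0 : Int)) ((nums.length : Int) - 1)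
          (PySem.List.pyGetD nums ((nums.length : Int) - 1) 0),
         PySem.List.pyGetD nums ((nums.length : Int) - 1) 0)
      = (sList nums, sCur nums) := by
    rw [hinit, hcur1, e2]
    exact loop1 nums (nums.length - 1) (by omega)
  rw [hsuf]
  -- initial forward-loop state
  have h0 : 0 < nums.length := hn
  have htake1 : nums.take 1 = [nums[0]] := by
    rw [show (1 : Nat) = 0 + 1 by rfl, List.take_add_one]
    simp [List.getElem?_eq_getElem h0]
  have hc0 : PySem.List.pyGetD nums 0 0 = nums[0] := by
    rw [show (0 : Int) = ((0 : Nat) : Int) by rfl, PySem.List.pyGetD_natCast]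
    exact List.getD_eq_getElem nums 0 h0
  have hcur0 : PySem.List.pyGetD nums 0 0 = sCur ((nums.take 1).reverse) := by
    rw [hc0, htake1]; simp [sCur_single]
  have hpre0 : PySem.List.pyGetD nums 0 0 = sBest ((nums.take 1).reverse) := by
    rw [hc0, htake1]; rfl
  -- A's forward loop = pure max-fold over the candidate sums
  have hA := loop2 nums gap ((nums.length : Int) - 1 - gap) (by omega)
    ((nums.length : Int) - 1 - gap - 1).toNat 1 (by omega) (by omega)
    (PySem.List.pyGetD nums 0 0) (PySem.List.pyGetD nums 0 0)
    (PySem.List.pyGetD nums 0 0 + PySem.List.pyGetD (sList nums) (1 + gap) 0)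
    hcur0 hpre0
  rw [show ((1 : Nat) : Int) = (1 : Int) by rfl] at hA
  rw [hA]
  -- B's two tables are pM and sList nums
  have hBpre : ((PySem.List.pyRange 0 (nums.length : Int) 1).foldl (pvB1 (pvPre nums))
        ([], 0)).1 = pM nums nums.length := by
    have h00 : (pM nums 0, ((nums.take 0).sum : Int) - mps ((nums.take 0).reverse)) = ([], 0) := by
      simp [pM, mps]
    have := loopB1 nums nums.length 0 (by omega)
    rw [show ((0 : Nat) : Int) = (0 : Int) by rfl, h00] at this
    rw [this]
  have hBsuf : (((PySem.List.pyRange ((nums.length : Int) - 1) (-1) (-1)).foldl (pvB2 (pvPre nums))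
        ([], PySem.List.pyGetD (pvPre nums) (nums.length : Int) 0)).1).reverse = sList nums := by
    have hinitB : ((sList (nums.drop nums.length)).reverse,
          ((nums.take nums.length).sum : Int) + mps (nums.drop nums.length))
        = ([], PySem.List.pyGetD (pvPre nums) (nums.length : Int) 0) := by
      rw [pre_read nums nums.length (by omega)]
      simp [sList, mps]
    have := loopB2 nums nums.length (by omega)
    rw [hinitB] at this
    rw [show ((nums.length : Int) - 1) = ((nums.length : Nat) : Int) - 1 by rfl, this,
        List.reverse_reverse]
  rw [hBpre, hBsuf]
  -- peel the first candidate of B's max()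
  rw [PySem.List.pyRange_one_cons (show (0 : Int) < (nums.length : Int) - 1 - gap by omega)]
  simp only [List.map_cons, PySem.List.max?_id_cons, Option.getD_some, List.foldl_map]
  have hpv0 : PySem.List.pyGetD (pM nums nums.length) 0 0
      = sBest ((nums.take 1).reverse) := by
    simpa using preVal nums 0 h0
  congr 1
  rw [show (0 : Int) + 1 + gap = 1 + gap by ring, hpv0, hc0, htake1]
  rfl
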